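-- pv_equiv track=rewrite | github.com/2021270902001sc/A-survey-of-AI4Arch- | build_literature_library.py | sorted_entries
-- ===== SOURCE A (Python) =====
-- CATEGORIES = {
--     "01_LLM_Agents_for_DSE": "LLM/agent-guided design space exploration",
--     "02_LLM_for_Microarchitecture_Policy_Design": "Microarchitecture policy design and reasoning",
--     "03_LLM_for_Simulation_Modeling_and_gem5": "Architecture simulation, modeling, gem5/ChampSim workflows",
--     "04_LLM_for_Performance_Analysis_and_Optimization": "Performance analysis and optimization",
--     "05_LLM_for_Hardware_Spec_RTL_Verification_when_arch_relevant": "HLS/RTL/specification/verification when architecture-relevant",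
--     "06_LLM_for_HPC_System_Codesign": "HPC/system/software-hardware co-design",
--     "90_Surveys_Position_and_Vision": "Surveys, benchmarks, position papers, vision papers",
--     "99_Candidates_Borderline": "Borderline EDA/RTL/compiler candidates",
-- }
--
-- def sorted_entries(entries):
--     category_order = {category: idx for idx, category in enumerate(CATEGORIES)}
--     return sorted(
--         entries,
--         key=lambda e: (
--             category_order.get(e.get("category", ""), 99),
--             -int(e.get("year") or 0),
--             e.get("title", "").lower(),
--         ),
--     )
-- ===== SOURCE B (Python) =====
-- CATEGORIES = {
--     "01_LLM_Agents_for_DSE": "LLM/agent-guided design space exploration",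
--     "02_LLM_for_Microarchitecture_Policy_Design": "Microarchitecture policy design and reasoning",
--     "03_LLM_for_Simulation_Modeling_and_gem5": "Architecture simulation, modeling, gem5/ChampSim workflows",
--     "04_LLM_for_Performance_Analysis_and_Optimization": "Performance analysis and optimization",
--     "05_LLM_for_Hardware_Spec_RTL_Verification_when_arch_relevant": "HLS/RTL/specification/verification when architecture-relevant",
--     "06_LLM_for_HPC_System_Codesign": "HPC/system/software-hardware co-design",
--     "90_Surveys_Position_and_Vision": "Surveys, benchmarks, position papers, vision papers",
--     "99_Candidates_Borderline": "Borderline EDA/RTL/compiler candidates",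
-- }
--
-- def sorted_entries(entries):
--     # Pigeonhole on the primary key: one bucket per known category rank (plus the
--     # 99 default bucket), each bucket sorted only by the secondary key
--     # (-year, lowercased title), buckets concatenated in rank order.
--     category_order = {category: idx for idx, category in enumerate(CATEGORIES)}
--
--     def rank(e):
--         return category_order.get(e.get("category", ""), 99)
--
--     out = []
--     for r in list(category_order.values()) + [99]:
--         bucket = [e for e in entries if rank(e) == r]
--         out += sorted(bucket, key=lambda e: (-int(e.get("year") or 0),
--                                              e.get("title", "").lower()))
--     return out
-- ===== Notes on version B (the rewrite author's own statement) =====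
-- stated objective: alternative
-- what changed: Replaces the single sort with a composite (category, -year, title) tuple key by a pigeonhole pass: the entries are partitioned into one bucket per known category rank (plus the 99 default bucket), each bucket is sorted only by the secondary key (-year, lowercased title), and the buckets are concatenated in rank order.
import Mathlib
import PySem

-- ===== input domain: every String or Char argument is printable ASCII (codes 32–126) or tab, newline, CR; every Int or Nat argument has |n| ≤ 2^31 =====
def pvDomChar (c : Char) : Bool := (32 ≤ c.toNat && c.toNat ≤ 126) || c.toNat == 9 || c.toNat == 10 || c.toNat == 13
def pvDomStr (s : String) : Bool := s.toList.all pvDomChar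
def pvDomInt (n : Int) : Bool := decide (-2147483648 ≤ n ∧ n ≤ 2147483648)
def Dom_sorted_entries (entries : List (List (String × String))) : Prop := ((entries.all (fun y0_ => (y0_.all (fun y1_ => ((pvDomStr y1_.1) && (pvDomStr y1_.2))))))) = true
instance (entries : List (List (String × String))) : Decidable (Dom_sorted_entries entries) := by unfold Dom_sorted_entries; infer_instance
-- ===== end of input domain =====

-- B replaces A's single composite-tuple-key sort by a pigeonhole pass: one bucket per
-- known category rank (plus the 99 default bucket), each bucket sorted only by the
-- secondary key (-year, lowercased title), buckets concatenated in rank order.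

-- CATEGORIES (module constant): a dict, as an insertion-ordered association list
def pvCATEGORIES : List (String × String) := [
  ("01_LLM_Agents_for_DSE", "LLM/agent-guided design space exploration"),
  ("02_LLM_for_Microarchitecture_Policy_Design", "Microarchitecture policy design and reasoning"),
  ("03_LLM_for_Simulation_Modeling_and_gem5", "Architecture simulation, modeling, gem5/ChampSim workflows"),
  ("04_LLM_for_Performance_Analysis_and_Optimization", "Performance analysis and optimization"),
  ("05_LLM_for_Hardware_Spec_RTL_Verification_when_arch_relevant", "HLS/RTL/specification/verification when architecture-relevant"),
  ("06_LLM_for_HPC_System_Codesign", "HPC/system/software-hardware co-design"),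
  ("90_Surveys_Position_and_Vision", "Surveys, benchmarks, position papers, vision papers"),
  ("99_Candidates_Borderline", "Borderline EDA/RTL/compiler candidates")]

-- {category: idx for idx, category in enumerate(CATEGORIES)}  (iterating a dict = its keys)
def pvCategoryOrder : PySem.Dict String Int :=
  PySem.Dict.mk ((PySem.List.enumerate (PySem.Dict.mk pvCATEGORIES).keys).map (fun p => (p.2, p.1)))

-- ===== PORT A =====
-- sorted(entries, key=lambda e: (category_order.get(...), -int(... or 0), ....lower())):
-- the 3-tuple key is ported with PySem.List.sorted2 (PySem's tuple-key sort), the first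
-- two components grouped into the lexicographic pair Int ×ₗ Int — exactly Python's
-- tuple comparison order.  The '.getD 0' arm where ofStr? is none is where Python's
-- int() raises ValueError; those inputs are excluded by Pre_.
def sorted_entries (entries : List (List (String × String))) : List (List (String × String)) :=
  PySem.List.sorted2 entries
    (fun e => toLex (pvCategoryOrder.getD ((PySem.Dict.mk e).getD "category" "") 99,
      -(match (PySem.Dict.mk e).get? "year" with
        | none => 0
        | some s => if s = "" then 0 else (PySem.Int.ofStr? s).getD 0)))
    (fun e => PySem.Str.lower ((PySem.Dict.mk e).getD "title" ""))

-- ===== PORT B =====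
-- rank(e) = category_order.get(e.get("category", ""), 99)
def pvRank (e : List (String × String)) : Int :=
  pvCategoryOrder.getD ((PySem.Dict.mk e).getD "category" "") 99

-- -int(e.get("year") or 0)  (first component of the bucket sort's tuple key)
def pvYear (e : List (String × String)) : Int :=
  -(match (PySem.Dict.mk e).get? "year" with
    | none => 0
    | some s => if s = "" then 0 else (PySem.Int.ofStr? s).getD 0)

-- e.get("title", "").lower()  (second component of the bucket sort's tuple key)
def pvTitle (e : List (String × String)) : String :=
  PySem.Str.lower ((PySem.Dict.mk e).getD "title" "")

-- for r in list(category_order.values()) + [99]: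
--     out += sorted([e for e in entries if rank(e) == r], key=<tuple key>)
def sorted_entries_alt (entries : List (List (String × String))) : List (List (String × String)) :=
  (pvCategoryOrder.values ++ [99]).foldl
    (fun out r =>
      out ++ PySem.List.sorted2 (entries.filter (fun e => pvRank e == r)) pvYear pvTitle) []

-- ===== PRECONDITION & SPEC =====
-- Pre_ excludes exactly the entries whose "year" value is a non-empty string that
-- int() cannot parse: there Python A (and B) raise ValueError.
def Pre_sorted_entries (entries : List (List (String × String))) : Prop :=
  (entries.all (fun e =>
    ((PySem.Dict.mk e).get? "year").all (fun s => s == "" || (PySem.Int.ofStr? s).isSome))) = true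
instance (entries : List (List (String × String))) : Decidable (Pre_sorted_entries entries) := by
  unfold Pre_sorted_entries; infer_instance

def pvWitness_sorted_entries : (List (List (String × String))) :=
  [[("category", "90_Surveys_Position_and_Vision"), ("year", "2021"), ("title", "A Survey")],
   [("title", "b paper"), ("year", "")],
   [("category", "01_LLM_Agents_for_DSE")]]

def Spec_sorted_entries (entries : List (List (String × String))) (out : List (List (String × String))) : Prop := out = sorted_entries_alt entries
instance (entries : List (List (String × String))) (out : List (List (String × String))) : Decidable (Spec_sorted_entries entries out) := by unfold Spec_sorted_entries; infer_instance

-- ===== CLAIM (what is proved, stated in full; the proofs are below) =====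
def Claim_equal_sorted_entries : Prop := ∀ (entries : List (List (String × String))), Dom_sorted_entries entries → Pre_sorted_entries entries → Spec_sorted_entries entries (sorted_entries entries)

-- ===== LEMMAS AND PROOFS =====

-- A's composite key, in terms of the named pieces (definitionally equal lambdas)
theorem pvA_eq (entries : List (List (String × String))) :
    sorted_entries entries =
      PySem.List.sorted2 entries (fun e => toLex (pvRank e, pvYear e)) pvTitle := rfl

-- sorted2 (Python's tuple-key sort) is the plain sort by the lexicographic pair key
theorem pvSorted2_eq {α κ₁ κ₂ : Type} [LinearOrder κ₁] [LinearOrder κ₂]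
    (xs : List α) (k1 : α → κ₁) (k2 : α → κ₂) :
    PySem.List.sorted2 xs k1 k2 =
      PySem.List.sorted xs (fun x => toLex (k1 x, k2 x)) := by
  have hcmp : (fun (a b : α) =>
        decide (k1 a < k1 b) || (!decide (k1 b < k1 a) && decide (k2 a < k2 b)))
      = (fun a b => decide (toLex (k1 a, k2 a) < toLex (k1 b, k2 b))) := by
    funext a b
    by_cases h1 : k1 a < k1 b
    · simp [h1, Prod.Lex.lt_iff]
    · by_cases h2 : k1 b < k1 a
      · have hne : k1 a ≠ k1 b := ne_of_gt h2
        simp [h1, h2, Prod.Lex.lt_iff, hne]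
      · have he : k1 a = k1 b := le_antisymm (not_lt.mp h2) (not_lt.mp h1)
        simp [Prod.Lex.lt_iff, he]
  rw [PySem.List.sorted_eq_foldl_insertBy]
  unfold PySem.List.sorted2
  simp only [if_neg (by decide : ¬ (false = true)), hcmp]

-- the concrete category_order dict
theorem pvCategoryOrder_eq :
    pvCategoryOrder = PySem.Dict.mk [
      ("01_LLM_Agents_for_DSE", 0),
      ("02_LLM_for_Microarchitecture_Policy_Design", 1),
      ("03_LLM_for_Simulation_Modeling_and_gem5", 2),
      ("04_LLM_for_Performance_Analysis_and_Optimization", 3),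
      ("05_LLM_for_Hardware_Spec_RTL_Verification_when_arch_relevant", 4),
      ("06_LLM_for_HPC_System_Codesign", 5),
      ("90_Surveys_Position_and_Vision", 6),
      ("99_Candidates_Borderline", 7)] := by decide

-- insertBy equations
theorem pvInsertBy_nil {α : Type} (b : α → α → Bool) (x : α) :
    PySem.List.insertBy b x [] = [x] := rfl

theorem pvInsertBy_cons {α : Type} (b : α → α → Bool) (x y : α) (ys : List α) :
    PySem.List.insertBy b x (y :: ys) =
      if b x y then x :: y :: ys else y :: PySem.List.insertBy b x ys := rfl

-- insertBy only looks at comparisons with members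
theorem pvInsertBy_congr {α : Type} (b b' : α → α → Bool) (x : α) (A : List α)
    (h : ∀ y ∈ A, b x y = b' x y) :
    PySem.List.insertBy b x A = PySem.List.insertBy b' x A := by
  induction A with
  | nil => rfl
  | cons y t ih =>
    have hy := h y (by simp)
    rw [pvInsertBy_cons, pvInsertBy_cons, hy]
    by_cases hb : b' x y = true
    · simp [hb]
    · simp only [Bool.not_eq_true] at hb
      simp [hb, ih (fun y hy => h y (by simp [hy]))]

-- insertion passes over a prefix it never goes before
theorem pvInsertBy_append_before {α : Type} (b : α → α → Bool) (x : α) (A B : List α)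
    (h : ∀ y ∈ A, b x y = false) :
    PySem.List.insertBy b x (A ++ B) = A ++ PySem.List.insertBy b x B := by
  induction A with
  | nil => rfl
  | cons y t ih =>
    have hy := h y (by simp)
    simp [pvInsertBy_cons, hy, ih (fun y hy' => h y (by simp [hy']))]

-- insertion lands before a suffix it always goes before
theorem pvInsertBy_append_after {α : Type} (b : α → α → Bool) (x : α) (A B : List α)
    (h : ∀ y ∈ B, b x y = true) :
    PySem.List.insertBy b x (A ++ B) = PySem.List.insertBy b x A ++ B := by
  induction A with
  | nil =>
    cases B with
    | nil => rfl
    | cons y t => simp [pvInsertBy_nil, pvInsertBy_cons, h y (by simp)]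
  | cons y t ih =>
    by_cases hb : b x y = true
    · simp [pvInsertBy_cons, hb]
    · simp only [Bool.not_eq_true] at hb
      simp [pvInsertBy_cons, hb, ih]

-- flatMap congruence on members
theorem pvFlatMap_congr {α β : Type} (L : List α) (f g : α → List β)
    (h : ∀ i ∈ L, f i = g i) : L.flatMap f = L.flatMap g := by
  induction L with
  | nil => rfl
  | cons i t ih =>
    simp [List.flatMap_cons, h i (by simp), ih (fun j hj => h j (by simp [hj]))]

-- THE BUCKET LEMMA: a stable sort by the lex key (r, k), when every r-value lies in the
-- strictly increasing list L, is the concatenation over L of the per-bucket stable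
-- k-sorts.
theorem pvBucket {α : Type} {κ : Type} [LinearOrder κ] (r : α → Int) (k : α → κ)
    (L : List Int) (hL : L.Pairwise (· < ·)) (xs : List α) (hx : ∀ x ∈ xs, r x ∈ L) :
    PySem.List.sorted xs (fun x => toLex (r x, k x)) =
      L.flatMap (fun i => PySem.List.sorted (xs.filter (fun x => r x == i)) k) := by
  induction xs using List.reverseRecOn with
  | nil =>
    have h0 : PySem.List.sorted ([] : List α) (fun x => toLex (r x, k x)) = [] := rfl
    have h0' : PySem.List.sorted ([] : List α) k = [] := rfl
    rw [h0]
    simp [h0']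
  | append_singleton xs x ih =>
    have hx' : ∀ y ∈ xs, r y ∈ L := fun y hy => hx y (by simp [hy])
    have hrx : r x ∈ L := hx x (by simp)
    obtain ⟨L1, L2, hLe⟩ := List.append_of_mem hrx
    subst hLe
    have hp := List.pairwise_append.mp hL
    have h1 : ∀ i ∈ L1, i < r x := fun i hi => hp.2.2 i hi (r x) (by simp)
    have h2 : ∀ j ∈ L2, r x < j := fun j hj => (List.pairwise_cons.mp hp.2.1).1 j hj
    -- LHS: appending x = one lex insertion into the sorted prefix
    have eL : PySem.List.sorted (xs ++ [x]) (fun x => toLex (r x, k x)) =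
        PySem.List.insertBy
          (fun a b => decide (toLex (r a, k a) < toLex (r b, k b))) x
          (PySem.List.sorted xs (fun x => toLex (r x, k x))) := by
      rw [PySem.List.sorted_eq_foldl_insertBy (xs ++ [x]) (fun x => toLex (r x, k x)),
        List.foldl_append,
        ← PySem.List.sorted_eq_foldl_insertBy xs (fun x => toLex (r x, k x))]
      rfl
    -- per-bucket: filtering xs ++ [x]
    have hfilt_ne : ∀ i : Int, i ≠ r x →
        (xs ++ [x]).filter (fun y => r y == i) = xs.filter (fun y => r y == i) := by
      intro i hne
      rw [List.filter_append]
      simp [List.filter, show (r x == i) = false from by simpa using (Ne.symm hne)]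
    have hfilt_eq :
        (xs ++ [x]).filter (fun y => r y == r x) = xs.filter (fun y => r y == r x) ++ [x] := by
      rw [List.filter_append]; simp [List.filter]
    -- bucket of r x: one more k-insertion
    have eB : PySem.List.sorted ((xs ++ [x]).filter (fun y => r y == r x)) k =
        PySem.List.insertBy (fun a b => decide (k a < k b)) x
          (PySem.List.sorted (xs.filter (fun y => r y == r x)) k) := by
      rw [hfilt_eq, PySem.List.sorted_eq_foldl_insertBy _ k, List.foldl_append,
        ← PySem.List.sorted_eq_foldl_insertBy _ k]
      rfl
    have hmemF : ∀ i : Int, ∀ y ∈ PySem.List.sorted (xs.filter (fun z => r z == i)) k,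
        r y = i := by
      intro i y hy
      have hm := (PySem.List.mem_sorted _ _ _ _).mp hy
      have := List.of_mem_filter hm
      simpa using this
    have eR1 : L1.flatMap (fun i => PySem.List.sorted ((xs ++ [x]).filter (fun y => r y == i)) k)
        = L1.flatMap (fun i => PySem.List.sorted (xs.filter (fun y => r y == i)) k) :=
      pvFlatMap_congr _ _ _ (fun i hi => by rw [hfilt_ne i (ne_of_lt (h1 i hi))])
    have eR2 : L2.flatMap (fun i => PySem.List.sorted ((xs ++ [x]).filter (fun y => r y == i)) k)
        = L2.flatMap (fun i => PySem.List.sorted (xs.filter (fun y => r y == i)) k) :=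
      pvFlatMap_congr _ _ _ (fun j hj => by rw [hfilt_ne j (ne_of_gt (h2 j hj))])
    rw [eL, ih hx', List.flatMap_append, List.flatMap_cons,
      List.flatMap_append, List.flatMap_cons, eR1, eR2, eB]
    rw [pvInsertBy_append_before _ x _ _ ?hbefore]
    case hbefore =>
      intro y hy
      rw [List.mem_flatMap] at hy
      obtain ⟨i, hi, hyi⟩ := hy
      have hry : r y = i := hmemF i y hyi
      have hnlt : ¬ toLex (r x, k x) < toLex (r y, k y) := by
        intro hlt
        rw [Prod.Lex.lt_iff] at hlt
        simp only [ofLex_toLex] at hlt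
        have hi' := h1 i hi
        rcases hlt with h | ⟨he, _⟩
        · rw [hry] at h; omega
        · rw [hry] at he; omega
      simpa using hnlt
    rw [pvInsertBy_append_after _ x _ _ ?hafter]
    case hafter =>
      intro y hy
      rw [List.mem_flatMap] at hy
      obtain ⟨j, hj, hyj⟩ := hy
      have hry : r y = j := hmemF j y hyj
      have hlt : toLex (r x, k x) < toLex (r y, k y) := by
        rw [Prod.Lex.lt_iff]; left; rw [hry]; exact h2 j hj
      simpa using hlt
    rw [pvInsertBy_congr _ (fun a b => decide (k a < k b)) x _ ?hcongr]
    case hcongr =>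
      intro y hy
      have hry : r y = r x := hmemF (r x) y hy
      simp only [decide_eq_decide, Prod.Lex.lt_iff, ofLex_toLex, hry]
      constructor
      · rintro (h | ⟨_, h⟩)
        · exact absurd h (lt_irrefl _)
        · exact h
      · intro h; exact Or.inr ⟨trivial, h⟩

-- sorted only looks at the key through 'decide (key a < key b)'
theorem pvSorted_congr {α κ κ' : Type} [LinearOrder κ] [LinearOrder κ']
    (xs : List α) (k : α → κ) (k' : α → κ')
    (h : ∀ a b, decide (k a < k b) = decide (k' a < k' b)) :
    PySem.List.sorted xs k = PySem.List.sorted xs k' := by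
  rw [PySem.List.sorted_eq_foldl_insertBy xs k, PySem.List.sorted_eq_foldl_insertBy xs k']
  have he : (fun (a b : α) => decide (k a < k b)) = (fun a b => decide (k' a < k' b)) := by
    funext a b; exact h a b
  rw [he]

-- left-nested lex triple (A's tuple key) orders like (rank, (year, title))
theorem pvKeyAssoc (xs : List (List (String × String))) :
    PySem.List.sorted xs (fun e => toLex (toLex (pvRank e, pvYear e), pvTitle e)) =
      PySem.List.sorted xs (fun e => toLex (pvRank e, toLex (pvYear e, pvTitle e))) := by
  apply pvSorted_congr
  intro a b
  simp only [decide_eq_decide, Prod.Lex.lt_iff, ofLex_toLex, toLex_inj, Prod.mk.injEq]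
  tauto

-- every rank lies in the bucket list
theorem pvRank_mem (e : List (String × String)) :
    pvRank e ∈ pvCategoryOrder.values ++ [99] := by
  rw [pvCategoryOrder_eq]
  unfold pvRank
  rw [pvCategoryOrder_eq]
  simp only [PySem.Dict.getD, PySem.Dict.get?_mk_cons, PySem.Dict.values_mk]
  split_ifs <;> simp [PySem.Dict.get?]

-- the bucket list is strictly increasing
theorem pvRanks_sorted : (pvCategoryOrder.values ++ [99]).Pairwise ((· < ·) : Int → Int → Prop) := by
  rw [pvCategoryOrder_eq]; decide

-- ===== VERDICT (by name: the statement is the Claim_ definition above) =====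
theorem sorted_entries_spec : Claim_equal_sorted_entries := by
  intro entries _ _
  show sorted_entries entries = sorted_entries_alt entries
  unfold sorted_entries_alt
  rw [PySem.List.foldl_append_eq_flatMap, pvA_eq, pvSorted2_eq, pvKeyAssoc,
    pvBucket pvRank (fun e => toLex (pvYear e, pvTitle e)) _ pvRanks_sorted entries
      (fun x _ => pvRank_mem x),
    pvFlatMap_congr _
      (fun i => PySem.List.sorted (entries.filter (fun e => pvRank e == i))
        (fun e => toLex (pvYear e, pvTitle e)))
      (fun i => PySem.List.sorted2 (entries.filter (fun e => pvRank e == i)) pvYear pvTitle)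
      (fun i _ => (pvSorted2_eq _ _ _).symm)]
  simp
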